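-- pv_equiv track=rewrite | github.com/aosp-mirror/platform_development | ndk/annotate_version_script.py | get_common_introduced
-- ===== SOURCE A (Python) =====
-- def get_common_introduced(db_entry, arches):
--     """Returns the common introduction API level or None.
--
--     If the symbol was introduced in the same API level for all architectures,
--     return that API level. If the symbol is not present in all architectures or
--     was introduced to them at different times, return None.
--     """
--     introduced = None
--     for arch in arches:
--         introduced_tag = 'introduced-' + arch
--         if introduced_tag not in db_entry:
--             return None
--         if introduced is None:
--             introduced = db_entry[introduced_tag]
--         elif db_entry[introduced_tag] != introduced:
--             return None
--         # Else we have the symbol in this arch and it's the same introduction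
--         # level. Keep going.
--     return introduced
-- ===== SOURCE B (Python) =====
-- def get_common_introduced(db_entry, arches):
--     """Returns the common introduction API level or None."""
--     levels = {db_entry.get('introduced-' + arch) for arch in arches}
--     if len(levels) == 1 and None not in levels:
--         return levels.pop()
--     return None
-- ===== Notes on version B (the rewrite author's own statement) =====
-- stated objective: simpler
-- what changed: A's early-returning loop threading an Optional accumulator is replaced by a single set comprehension of db_entry.get(tag) values (None as the missing-tag sentinel) followed by a cardinality test: the common level exists iff the set is a singleton not containing None.
import Mathlib
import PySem

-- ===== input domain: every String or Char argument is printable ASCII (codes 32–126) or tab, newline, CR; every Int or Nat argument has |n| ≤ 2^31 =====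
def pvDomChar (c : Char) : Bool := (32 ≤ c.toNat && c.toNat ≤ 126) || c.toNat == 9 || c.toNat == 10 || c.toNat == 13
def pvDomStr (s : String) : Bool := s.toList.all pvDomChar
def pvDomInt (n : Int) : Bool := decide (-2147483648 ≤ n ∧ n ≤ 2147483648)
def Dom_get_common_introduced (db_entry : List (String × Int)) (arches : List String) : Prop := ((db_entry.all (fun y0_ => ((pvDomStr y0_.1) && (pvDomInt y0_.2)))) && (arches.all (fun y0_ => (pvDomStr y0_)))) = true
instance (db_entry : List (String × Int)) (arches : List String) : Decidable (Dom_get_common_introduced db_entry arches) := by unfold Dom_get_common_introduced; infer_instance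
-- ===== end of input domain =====

-- B replaces A's early-returning loop threading an Optional accumulator by one set
-- comprehension of db_entry.get(tag) values (None as missing-tag sentinel) and a
-- cardinality test; simpler, same cost.

-- ===== PORT A =====
-- A's loop: thread the Optional accumulator `introduced` through the arches, returning
-- early with None on a missing tag or a mismatching value.
def gciLoopA (db_entry : List (String × Int)) : List String → Option Int → Option Int
  | [], introduced => introduced
  | arch :: rest, introduced =>
    match (PySem.Dict.mk db_entry).get? ("introduced-" ++ arch) with
    | none => none        -- `introduced_tag not in db_entry`: return None
    | some v =>
      match introduced with
      | none => gciLoopA db_entry rest (some v)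
      | some i => if v ≠ i then none else gciLoopA db_entry rest (some i)

def get_common_introduced (db_entry : List (String × Int)) (arches : List String) : Option Int :=
  gciLoopA db_entry arches none

-- ===== PORT B =====
def get_common_introduced_alt (db_entry : List (String × Int)) (arches : List String) : Option Int :=
  let d := PySem.Dict.mk db_entry
  -- levels = {db_entry.get('introduced-' + arch) for arch in arches}
  let levels : PySem.Set (Option Int) :=
    arches.foldl (fun s arch => PySem.Set.add s (d.get? ("introduced-" ++ arch))) PySem.Set.empty
  if PySem.Set.len levels == 1 && !(PySem.Set.contains levels none) then
    -- levels.pop() on a singleton set: its unique element (order-independent)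
    (levels.head?.getD none)
  else none

-- ===== PRECONDITION & SPEC =====
def Spec_get_common_introduced (db_entry : List (String × Int)) (arches : List String) (out : Option Int) : Prop := out = get_common_introduced_alt db_entry arches
instance (db_entry : List (String × Int)) (arches : List String) (out : Option Int) : Decidable (Spec_get_common_introduced db_entry arches out) := by unfold Spec_get_common_introduced; infer_instance

-- ===== CLAIM (what is proved, stated in full; the proofs are below) =====
def Claim_equal_get_common_introduced : Prop := ∀ (db_entry : List (String × Int)) (arches : List String), Dom_get_common_introduced db_entry arches → Spec_get_common_introduced db_entry arches (get_common_introduced db_entry arches)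

-- ===== LEMMAS AND PROOFS =====

-- B's final test and pop, as a function of the accumulated set.
def gciFinish (levels : PySem.Set (Option Int)) : Option Int :=
  if PySem.Set.len levels == 1 && !(PySem.Set.contains levels none) then
    (levels.head?.getD none) else none

theorem gciFinish_eq (db_entry : List (String × Int)) (arches : List String) :
    get_common_introduced_alt db_entry arches =
      gciFinish (arches.foldl (fun s arch =>
        PySem.Set.add s ((PySem.Dict.mk db_entry).get? ("introduced-" ++ arch))) PySem.Set.empty) := rfl

-- A set that already contains None, or already holds two elements, can never pass
-- B's final test, however the fold extends it.
theorem gciFinish_dead (db_entry : List (String × Int)) (l : List String)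
    (s : PySem.Set (Option Int)) (hs : none ∈ s ∨ 2 ≤ s.length) :
    gciFinish (l.foldl (fun s arch =>
      PySem.Set.add s ((PySem.Dict.mk db_entry).get? ("introduced-" ++ arch))) s) = none := by
  induction l generalizing s with
  | nil =>
    simp only [List.foldl_nil]
    unfold gciFinish
    rcases hs with h | h
    · simp only [ite_eq_right_iff, Bool.and_eq_true, beq_iff_eq, Bool.not_eq_eq_eq_not,
        Bool.not_true, and_imp]
      intro _ hc
      rw [(PySem.Set.contains_iff s none).mpr h] at hc
      cases hc
    · simp only [PySem.Set.len, ite_eq_right_iff, Bool.and_eq_true, beq_iff_eq, and_imp]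
      intro h1 _
      exact absurd h1 (by omega)
  | cons a rest ih =>
    simp only [List.foldl_cons]
    apply ih
    rcases hs with h | h
    · exact Or.inl ((PySem.Set.mem_add _ _ _).mpr (Or.inl h))
    · right
      rw [PySem.Set.add_eq_ite]
      split
      · exact h
      · simp only [List.length_append, List.length_cons, List.length_nil]
        omega

-- Once A's accumulator is `some i`, A's remaining loop equals B's finish of the fold
-- started from the singleton set {some i}.
theorem gciLoopA_eq_finish_some (db_entry : List (String × Int)) (l : List String) (i : Int) :
    gciLoopA db_entry l (some i) =
      gciFinish (l.foldl (fun s arch =>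
        PySem.Set.add s ((PySem.Dict.mk db_entry).get? ("introduced-" ++ arch))) [some i]) := by
  induction l with
  | nil =>
    simp only [List.foldl_nil, gciLoopA]
    rfl
  | cons a rest ih =>
    simp only [gciLoopA, List.foldl_cons]
    obtain h | ⟨v, h⟩ := Option.eq_none_or_eq_some ((PySem.Dict.mk db_entry).get? ("introduced-" ++ a))
    · rw [h]
      have hadd : PySem.Set.add ([some i] : PySem.Set (Option Int)) none = [some i, none] := by
        rw [PySem.Set.add_eq_ite]; simp
      rw [hadd, gciFinish_dead]
      exact Or.inl (by simp)
    · rw [h]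
      by_cases hv : v = i
      · subst hv
        have hadd : PySem.Set.add ([some v] : PySem.Set (Option Int)) (some v) = [some v] := by
          rw [PySem.Set.add_eq_ite]; simp
        rw [hadd]
        simpa using ih
      · have hadd : PySem.Set.add ([some i] : PySem.Set (Option Int)) (some v) = [some i, some v] := by
          rw [PySem.Set.add_eq_ite]; simp [hv]
        rw [hadd, gciFinish_dead]
        · simp [hv]
        · right; simp
      
-- ===== VERDICT (by name: the statement is the Claim_ definition above) =====
theorem get_common_introduced_spec : Claim_equal_get_common_introduced := by
  intro db_entry arches _
  unfold Spec_get_common_introduced get_common_introduced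
  rw [gciFinish_eq]
  cases arches with
  | nil => rfl
  | cons a rest =>
    simp only [gciLoopA, List.foldl_cons]
    obtain h | ⟨v, h⟩ := Option.eq_none_or_eq_some ((PySem.Dict.mk db_entry).get? ("introduced-" ++ a))
    · rw [h]
      have hadd : PySem.Set.add (PySem.Set.empty : PySem.Set (Option Int)) none = [none] := rfl
      rw [hadd, gciFinish_dead]
      exact Or.inl (by simp)
    · rw [h]
      have hadd : PySem.Set.add (PySem.Set.empty : PySem.Set (Option Int)) (some v) = [some v] := rfl
      rw [hadd]
      exact gciLoopA_eq_finish_some db_entry rest v
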